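-- pv_equiv track=rewrite | github.com/IMC-UAS-Krems/fiware_admin | examples/kindergarten_wien/process_data.py | clean_fiware_string
-- ===== SOURCE A (Python) =====
-- def clean_fiware_string(text_value):
--     if text_value is None or not isinstance(text_value, str):
--         return text_value  # Return as is if None or not a string
--
--     # Characters explicitly forbidden by FIWARE documentation
--     forbidden_chars = ['<', '>', '"', "'", '=', ';', '(', ')']
--     for char in forbidden_chars:
--         # Remove forbidden characters
--         text_value = text_value.replace(char, '')
--
--     # Replace multiple spaces with a single space and strip leading/trailing spaces
--     text_value = ' '.join(text_value.split()).strip()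
--
--     return text_value
-- ===== SOURCE B (Python) =====
-- def clean_fiware_string(text_value):
--     if text_value is None or not isinstance(text_value, str):
--         return text_value  # Return as is if None or not a string
--
--     forbidden = set('<>"\'=;()')
--     out = []
--     pending_space = False
--     for c in text_value:
--         if c in forbidden:
--             continue  # drop forbidden chars; they do not affect spacing state
--         if c.isspace():
--             if out:
--                 pending_space = True
--         else:
--             if pending_space:
--                 out.append(' ')
--                 pending_space = False
--             out.append(c)
--     return ''.join(out)
-- ===== Notes on version B (the rewrite author's own statement) =====
-- stated objective: alternative
-- what changed: Replaced the eight whole-string replace passes plus split/join/strip with a single linear scan maintaining an output list and a pending-space flag (a small state machine).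
import Mathlib
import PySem

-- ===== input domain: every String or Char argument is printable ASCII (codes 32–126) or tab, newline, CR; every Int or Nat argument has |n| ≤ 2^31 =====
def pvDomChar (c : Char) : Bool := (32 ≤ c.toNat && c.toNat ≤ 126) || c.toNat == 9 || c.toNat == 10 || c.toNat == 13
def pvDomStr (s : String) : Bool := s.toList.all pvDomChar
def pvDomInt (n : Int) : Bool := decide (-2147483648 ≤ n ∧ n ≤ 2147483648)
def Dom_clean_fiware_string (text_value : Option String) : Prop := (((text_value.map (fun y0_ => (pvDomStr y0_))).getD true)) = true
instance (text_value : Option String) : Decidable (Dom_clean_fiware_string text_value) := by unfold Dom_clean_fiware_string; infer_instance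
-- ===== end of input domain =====

-- B replaces A's eight replace-scans plus split/join/strip by ONE linear pass with a pending-space state machine (objective: alternative — same asymptotic cost, single traversal instead of ~11).


-- ===== PORT A =====
def clean_fiware_string (text_value : Option String) : Option String :=
  match text_value with
  | none => none
  | some s =>
    -- for char in forbidden_chars: text_value = text_value.replace(char, '')
    let t := ["<", ">", "\"", "'", "=", ";", "(", ")"].foldl
      (fun acc ch => PySem.Str.replace acc ch "") s
    -- text_value = ' '.join(text_value.split()).strip()
    some (PySem.Str.strip (PySem.Str.join " " (PySem.Str.split₀ t)))

-- ===== PORT B =====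
-- forbidden = set('<>"\'=;()')
def pvForbidden : PySem.Set Char := PySem.Set.ofList "<>\"'=;()".toList

-- the for-loop of Source B: state = (out, pending_space); ''.join at the end is String.ofList
def pvCleanGo : List Char → List Char → Bool → List Char
  | [], out, _ => out
  | c :: rest, out, pending =>
    if PySem.Set.contains pvForbidden c then pvCleanGo rest out pending
    else if PySem.Chars.isspace c then
      pvCleanGo rest out (if out.isEmpty then pending else true)
    else
      pvCleanGo rest ((if pending then out ++ [' '] else out) ++ [c]) false

def clean_fiware_string_alt (text_value : Option String) : Option String :=
  match text_value with
  | none => none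
  | some s => some (String.ofList (pvCleanGo s.toList [] false))

-- ===== PRECONDITION & SPEC =====
def Spec_clean_fiware_string (text_value : Option String) (out : Option String) : Prop := out = clean_fiware_string_alt text_value
instance (text_value : Option String) (out : Option String) : Decidable (Spec_clean_fiware_string text_value out) := by unfold Spec_clean_fiware_string; infer_instance

-- ===== CLAIM (what is proved, stated in full; the proofs are below) =====
def Claim_equal_clean_fiware_string : Prop := ∀ (text_value : Option String), Dom_clean_fiware_string text_value → Spec_clean_fiware_string text_value (clean_fiware_string text_value)

-- ===== LEMMAS AND PROOFS =====

theorem pv_replace_go_filter (c : Char) : ∀ (s : List Char) (fuel : Nat) (acc : List Char),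
    s.length ≤ fuel →
    PySem.Chars.replace.go [c] [] fuel s acc = acc.reverse ++ s.filter (fun x => !(x == c)) := by
  intro s
  induction s with
  | nil =>
    intro fuel acc _
    cases fuel <;> simp [PySem.Chars.replace.go]
  | cons x t ih =>
    intro fuel acc h
    cases fuel with
    | zero => simp at h
    | succ f =>
      simp only [PySem.Chars.replace.go]
      by_cases hx : c = x
      · subst hx
        simp only [List.isPrefixOf, beq_self_eq_true, Bool.and_self, if_true,
          List.length_cons, List.length_nil, List.drop_succ_cons, List.drop_zero,
          List.reverse_nil, List.nil_append]
        rw [ih f acc (by simpa using h)]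
        simp [List.filter]
      · have hpre : ([c].isPrefixOf (x :: t)) = false := by
          simp [List.isPrefixOf]; exact fun h' => absurd h' hx
        rw [hpre]
        simp only [Bool.false_eq_true, if_false]
        rw [ih f (x :: acc) (by simpa using h)]
        have : (!(x == c)) = true := by simp [Ne.symm hx]
        simp [List.filter, this]

theorem pv_replace_filter (c : Char) (s : List Char) :
    PySem.Chars.replace s [c] [] = s.filter (fun x => !(x == c)) := by
  have := pv_replace_go_filter c s s.length [] (le_refl _)
  simpa [PySem.Chars.replace] using this

def pvKeep (c : Char) : Bool := !(PySem.Set.contains pvForbidden c)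

theorem pv_filter_chain (s : String) :
    ((["<", ">", "\"", "'", "=", ";", "(", ")"].foldl
      (fun acc ch => PySem.Str.replace acc ch "") s)).toList = s.toList.filter pvKeep := by
  simp only [List.foldl, PySem.Str.toList_replace]
  rw [show ("<":String).toList = ['<'] from by decide, show (">":String).toList = ['>'] from by decide,
     show ("\"":String).toList = ['"'] from by decide, show ("'":String).toList = ['\''] from by decide,
     show ("=":String).toList = ['='] from by decide, show (";":String).toList = [';'] from by decide,
     show ("(":String).toList = ['('] from by decide, show (")":String).toList = [')'] from by decide,
     show ("":String).toList = [] from by decide]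
  simp only [pv_replace_filter, List.filter_filter]
  apply List.filter_congr
  intro x _
  simp only [pvKeep, pvForbidden]
  by_cases h1 : x = '<'; · simp [h1, PySem.Set.contains]
  by_cases h2 : x = '>'; · simp [h2, PySem.Set.contains]
  by_cases h3 : x = '"'; · simp [h3, PySem.Set.contains]
  by_cases h4 : x = '\''; · simp [h4, PySem.Set.contains]
  by_cases h5 : x = '='; · simp [h5, PySem.Set.contains]
  by_cases h6 : x = ';'; · simp [h6, PySem.Set.contains]
  by_cases h7 : x = '('; · simp [h7, PySem.Set.contains]
  by_cases h8 : x = ')'; · simp [h8, PySem.Set.contains]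
  simp [PySem.Set.contains, PySem.Set.ofList, h1, h2, h3, h4, h5, h6, h7, h8]

def pvGo2 : List Char → List Char → Bool → List Char
  | [], out, _ => out
  | c :: rest, out, pending =>
    if PySem.Chars.isspace c then
      pvGo2 rest out (if out.isEmpty then pending else true)
    else
      pvGo2 rest ((if pending then out ++ [' '] else out) ++ [c]) false

theorem pv_go_filter : ∀ (u out : List Char) (p : Bool),
    pvCleanGo u out p = pvGo2 (u.filter pvKeep) out p := by
  intro u
  induction u with
  | nil => intro out p; rfl
  | cons c rest ih =>
    intro out p
    simp only [pvCleanGo, List.filter]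
    by_cases hc : PySem.Set.contains pvForbidden c = true
    · have hk : pvKeep c = false := by simp only [pvKeep, hc, Bool.not_true]
      simp only [hc, if_true, hk, ih]
    · have hc' : PySem.Set.contains pvForbidden c = false := by simpa using hc
      have hk : pvKeep c = true := by simp only [pvKeep, hc', Bool.not_false]
      simp only [hc', Bool.false_eq_true, if_false, hk, if_true, pvGo2, ih]

theorem pv_join_snoc (l : List (List Char)) (w : List Char) :
    PySem.Chars.join [' '] (l ++ [w]) =
      if l.isEmpty then w else PySem.Chars.join [' '] l ++ ' ' :: w := by
  induction l with
  | nil => simp [PySem.Chars.join_singleton]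
  | cons x xs ih =>
    cases xs with
    | nil => simp [PySem.Chars.join_cons_cons, PySem.Chars.join_singleton]
    | cons y ys =>
      have e1 : (x :: y :: ys) ++ [w] = x :: y :: (ys ++ [w]) := rfl
      rw [e1, PySem.Chars.join_cons_cons]
      have e2 : y :: (ys ++ [w]) = (y :: ys) ++ [w] := rfl
      rw [e2, ih, PySem.Chars.join_cons_cons]
      simp

def pvP (w : List Char) : Prop := w ≠ [] ∧ ∀ c ∈ w, PySem.Chars.isspace c = false

theorem pv_join_ne_nil (parts : List (List Char)) (h : ∀ w ∈ parts, pvP w) (hp : parts ≠ []) :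
    PySem.Chars.join [' '] parts ≠ [] := by
  match parts with
  | [w] =>
    rw [PySem.Chars.join_singleton]
    exact (h w (by simp)).1
  | w :: q :: rest =>
    rw [PySem.Chars.join_cons_cons]
    have := (h w (by simp)).1
    simp [this]

theorem pv_split_words : ∀ (u cur : List Char) (acc : List (List Char)),
    (∀ w ∈ acc, pvP w) → (∀ c ∈ cur, PySem.Chars.isspace c = false) →
    ∀ w ∈ PySem.Chars.split₀.go u cur acc, pvP w := by
  intro u
  induction u with
  | nil =>
    intro cur acc hacc hcur w hw
    simp only [PySem.Chars.split₀.go] at hw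
    by_cases hc : cur.isEmpty = true
    · simp [hc] at hw
      exact hacc w hw
    · simp [hc] at hw
      rcases hw with hw | hw
      · exact hacc w hw
      · subst hw
        refine ⟨by simpa using hc, ?_⟩
        intro c hcmem
        exact hcur c (by simpa using hcmem)
  | cons c rest ih =>
    intro cur acc hacc hcur w hw
    simp only [PySem.Chars.split₀.go] at hw
    by_cases hs : PySem.Chars.isspace c = true
    · simp only [hs, if_true] at hw
      by_cases hc : cur.isEmpty = true
      · simp only [hc, if_true] at hw
        exact ih [] acc hacc (by simp) w hw
      · simp only [hc, Bool.false_eq_true, if_false] at hw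
        refine ih [] (cur.reverse :: acc) ?_ (by simp) w hw
        intro v hv
        rcases List.mem_cons.mp hv with hv | hv
        · subst hv
          refine ⟨by simpa using hc, ?_⟩
          intro d hd
          exact hcur d (by simpa using hd)
        · exact hacc v hv
    · simp only [hs, if_false] at hw
      refine ih (c :: cur) acc hacc ?_ w hw
      intro d hd
      rcases List.mem_cons.mp hd with hd | hd
      · subst hd; simpa using hs
      · exact hcur d hd

def pvS (cur : List Char) (acc : List (List Char)) : List Char :=
  PySem.Chars.join [' '] acc.reverse ++
    (if acc.isEmpty || cur.isEmpty then [] else [' ']) ++ cur.reverse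

theorem pvS_nil (acc : List (List Char)) : pvS [] acc = PySem.Chars.join [' '] acc.reverse := by
  simp [pvS]

theorem pvS_ne_of_cur (cur : List Char) (acc : List (List Char)) (h : cur ≠ []) :
    pvS cur acc ≠ [] := by
  simp [pvS, h]

theorem pvS_nil_ne (acc : List (List Char)) (hacc : ∀ w ∈ acc, pvP w) (h : acc ≠ []) :
    pvS [] acc ≠ [] := by
  rw [pvS_nil]
  exact pv_join_ne_nil _ (fun w hw => hacc w (List.mem_reverse.mp hw)) (by simpa using h)

theorem pvS_snoc (cur : List Char) (acc : List (List Char)) (h : cur ≠ []) :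
    pvS [] (cur.reverse :: acc) = pvS cur acc := by
  rw [pvS_nil, List.reverse_cons, pv_join_snoc]
  by_cases ha : acc = []
  · subst ha; simp [pvS, h]
  · have : acc.isEmpty = false := by simpa using ha
    simp [pvS, this, h, List.isEmpty_iff]

theorem pvS_push (c : Char) (cur : List Char) (acc : List (List Char)) :
    (if (cur.isEmpty && !acc.isEmpty) then pvS cur acc ++ [' '] else pvS cur acc) ++ [c]
      = pvS (c :: cur) acc := by
  by_cases hc : cur = []
  · subst hc
    by_cases ha : acc = []
    · subst ha; simp [pvS]
    · have ha' : acc.isEmpty = false := by simpa using ha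
      simp [pvS, ha']
  · have hc' : cur.isEmpty = false := by simpa using hc
    simp only [hc', Bool.false_and, Bool.false_eq_true, if_false, pvS, List.reverse_cons]
    by_cases ha : acc = []
    · subst ha; simp
    · have ha' : acc.isEmpty = false := by simpa using ha
      simp [ha', List.append_assoc]

theorem pv_main : ∀ (u cur : List Char) (acc : List (List Char)),
    (∀ w ∈ acc, pvP w) → (∀ c ∈ cur, PySem.Chars.isspace c = false) →
    PySem.Chars.join [' '] (PySem.Chars.split₀.go u cur acc) =
      pvGo2 u (pvS cur acc) (cur.isEmpty && !acc.isEmpty) := by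
  intro u
  induction u with
  | nil =>
    intro cur acc hacc hcur
    simp only [PySem.Chars.split₀.go, pvGo2]
    by_cases hc : cur = []
    · subst hc; simp [pvS_nil]
    · have hc' : cur.isEmpty = false := by simpa using hc
      simp only [hc', Bool.false_eq_true, if_false]
      rw [List.reverse_cons, pv_join_snoc]
      by_cases ha : acc = []
      · subst ha; simp [pvS, hc']
      · have ha' : acc.isEmpty = false := by simpa using ha
        simp [pvS, ha', hc', List.isEmpty_iff, List.append_assoc]
  | cons c rest ih =>
    intro cur acc hacc hcur
    simp only [PySem.Chars.split₀.go, pvGo2]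
    by_cases hs : PySem.Chars.isspace c = true
    · simp only [hs, if_true]
      by_cases hc : cur = []
      · subst hc
        simp only [List.isEmpty_nil, if_true, Bool.true_and]
        rw [ih [] acc hacc (by simp)]
        simp only [List.isEmpty_nil, Bool.true_and]
        congr 1
        by_cases ha : acc = []
        · subst ha; simp [pvS]
        · have ha' : acc.isEmpty = false := by simpa using ha
          have hne : pvS [] acc ≠ [] := pvS_nil_ne acc hacc ha
          have : (pvS [] acc).isEmpty = false := by simpa using hne
          simp [this, ha']
      · have hc' : cur.isEmpty = false := by simpa using hc
        simp only [hc', Bool.false_eq_true, if_false]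
        rw [ih [] (cur.reverse :: acc) ?_ (by simp)]
        · rw [pvS_snoc cur acc hc]
          have hne : pvS cur acc ≠ [] := pvS_ne_of_cur cur acc hc
          have hie : (pvS cur acc).isEmpty = false := by simpa using hne
          simp [hie]
        · intro w hw
          rcases List.mem_cons.mp hw with hw | hw
          · subst hw
            exact ⟨by simpa using hc, fun d hd => hcur d (by simpa using hd)⟩
          · exact hacc w hw
    · have hs' : PySem.Chars.isspace c = false := by simpa using hs
      simp only [hs', Bool.false_eq_true, if_false]
      rw [ih (c :: cur) acc hacc ?_]
      · rw [← pvS_push c cur acc]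
        simp
      · intro d hd
        rcases List.mem_cons.mp hd with hd | hd
        · subst hd; simpa using hs
        · exact hcur d hd

theorem pv_join_head (parts : List (List Char)) (h : ∀ w ∈ parts, pvP w) (hp : parts ≠ []) :
    ∃ c cs, PySem.Chars.join [' '] parts = c :: cs ∧ PySem.Chars.isspace c = false := by
  match parts with
  | [w] =>
    obtain ⟨hne, hns⟩ := h w (by simp)
    cases hw : w with
    | nil => exact absurd hw hne
    | cons c cs =>
      exact ⟨c, cs, by rw [PySem.Chars.join_singleton], hns c (by rw [hw]; exact List.mem_cons_self ..)⟩
  | w :: q :: rest =>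
    obtain ⟨hne, hns⟩ := h w (by simp)
    cases hw : w with
    | nil => exact absurd hw hne
    | cons c cs =>
      refine ⟨c, cs ++ [' '] ++ PySem.Chars.join [' '] (q :: rest), ?_, hns c (by rw [hw]; exact List.mem_cons_self ..)⟩
      rw [PySem.Chars.join_cons_cons]
      simp

theorem pv_join_last (parts : List (List Char)) (h : ∀ w ∈ parts, pvP w) (hp : parts ≠ []) :
    ∃ c cs, (PySem.Chars.join [' '] parts).reverse = c :: cs ∧ PySem.Chars.isspace c = false := by
  induction parts with
  | nil => exact absurd rfl hp
  | cons w rest ih =>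
    cases rest with
    | nil =>
      obtain ⟨hne, hns⟩ := h w (by simp)
      cases hw : w.reverse with
      | nil => exact absurd (by simpa using hw) hne
      | cons c cs =>
        refine ⟨c, cs, by rw [PySem.Chars.join_singleton, hw], ?_⟩
        exact hns c (List.mem_reverse.mp (by rw [hw]; simp))
    | cons q rest' =>
      obtain ⟨c, cs, hr, hc⟩ := ih (fun v hv => h v (by simp [hv])) (by simp)
      refine ⟨c, cs ++ [' '] ++ w.reverse, ?_, hc⟩
      rw [PySem.Chars.join_cons_cons]
      simp [hr]

theorem pv_strip_join (parts : List (List Char)) (h : ∀ w ∈ parts, pvP w) :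
    PySem.Chars.strip (PySem.Chars.join [' '] parts) = PySem.Chars.join [' '] parts := by
  by_cases hp : parts = []
  · subst hp
    simp [PySem.Chars.join_nil, PySem.Chars.strip, PySem.Chars.lstrip, PySem.Chars.rstrip]
  · obtain ⟨c, cs, hj, hc⟩ := pv_join_head parts h hp
    obtain ⟨d, ds, hr, hd⟩ := pv_join_last parts h hp
    have h1 : List.dropWhile PySem.Chars.isspace (PySem.Chars.join [' '] parts)
        = PySem.Chars.join [' '] parts := by
      rw [hj]; simp [List.dropWhile_cons, hc]
    have h2 : List.dropWhile PySem.Chars.isspace (PySem.Chars.join [' '] parts).reverse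
        = (PySem.Chars.join [' '] parts).reverse := by
      rw [hr]; simp [List.dropWhile_cons, hd]
    simp [PySem.Chars.strip, PySem.Chars.lstrip, PySem.Chars.rstrip, h1, h2]

-- ===== VERDICT (by name: the statement is the Claim_ definition above) =====
theorem clean_fiware_string_spec : Claim_equal_clean_fiware_string := by
  intro tv _
  unfold Spec_clean_fiware_string
  match tv with
  | none => rfl
  | some s =>
    refine congrArg some (String.toList_inj.mp ?_)
    simp only [String.toList_ofList, PySem.Str.toList_strip, PySem.Str.toList_join]
    rw [show (" " : String).toList = [' '] from rfl]
    rw [PySem.Str.split₀_map_toList, pv_filter_chain]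
    have hw := pv_split_words (s.toList.filter pvKeep) [] []
      (by intro w hw; simp at hw) (by intro c hc; simp at hc)
    rw [pv_strip_join _ (by exact hw)]
    rw [show PySem.Chars.split₀ (s.toList.filter pvKeep)
          = PySem.Chars.split₀.go (s.toList.filter pvKeep) [] [] from rfl]
    rw [pv_main _ [] [] (by intro w hw; simp at hw) (by intro c hc; simp at hc)]
    rw [pv_go_filter]
    rfl
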